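-- pv_equiv track=rewrite | github.com/tuhuuxxx/Learning-Python | Ki Ba Lan Class.py | check_incre_decre_op
-- ===== SOURCE A (Python) =====
-- def is_operator(ch):
--     return ch in ['^', '*', '/', '+', '-']
--
-- def check_incre_decre_op(s):
--     result = []
--     for i in range(len(s)):
--         if (i==0 and (s[i]=='+' or s[i]=='-')) or (is_operator(s[i-1]) and (s[i]=='+' or s[i]=='-')) or (s[i-1]=='(' and (s[i]=='+' or s[i]=='-')):
--             result.append('true')
--         else:
--             result.append('false')
--     return result
-- ===== SOURCE B (Python) =====
-- def check_incre_decre_op(s):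
--     pm = {i for i, c in enumerate(s) if c in '+-'}
--     after_trig = {0} | {i + 1 for i, c in enumerate(s) if c in '^*/+-('}
--     marked = pm & after_trig
--     return ['true' if i in marked else 'false' for i in range(len(s))]
-- ===== Notes on version B (the rewrite author's own statement) =====
-- stated objective: alternative
-- what changed: B replaces A's single index loop with look-back conditions by a set-algebra computation: it builds the set of sign positions and the set of positions following a trigger (with 0 added), intersects them, and renders the result by membership test.
import Mathlib
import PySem

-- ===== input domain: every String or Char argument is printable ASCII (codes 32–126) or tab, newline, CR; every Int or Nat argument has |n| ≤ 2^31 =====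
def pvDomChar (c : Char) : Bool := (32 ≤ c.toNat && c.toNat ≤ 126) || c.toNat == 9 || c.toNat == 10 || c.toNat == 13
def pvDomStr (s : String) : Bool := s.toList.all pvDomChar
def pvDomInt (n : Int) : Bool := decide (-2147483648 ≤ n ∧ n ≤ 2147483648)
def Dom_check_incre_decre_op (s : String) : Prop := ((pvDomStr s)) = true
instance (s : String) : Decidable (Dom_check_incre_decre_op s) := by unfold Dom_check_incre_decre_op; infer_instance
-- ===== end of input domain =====

-- B is a different algorithm: instead of A's index loop that tests each character against its
-- predecessor, B computes two index SETS (sign positions; positions following a trigger, plus 0),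
-- intersects them, and renders the output by a membership test.

-- ===== PORT A =====
def is_operator (ch : Char) : Bool := ['^', '*', '/', '+', '-'].contains ch

def check_incre_decre_op (s : String) : List String :=
  let cs := s.toList
  (PySem.List.pyRange 0 cs.length 1).foldl (fun result i =>
    let cur := PySem.List.pyGetD cs i ' '
    let prev := PySem.List.pyGetD cs (i - 1) ' '
    if (i == 0 && (cur == '+' || cur == '-')) ||
       (is_operator prev && (cur == '+' || cur == '-')) ||
       (prev == '(' && (cur == '+' || cur == '-')) then
      result ++ ["true"]
    else
      result ++ ["false"]) []

-- ===== PORT B =====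
def check_incre_decre_op_alt (s : String) : List String :=
  let cs := s.toList
  let pm : PySem.Set Int :=
    PySem.Set.ofList ((PySem.List.enumerate cs).filterMap
      (fun ic => if "+-".toList.contains ic.2 then some ic.1 else none))
  let after_trig : PySem.Set Int :=
    PySem.Set.union (PySem.Set.ofList [(0 : Int)])
      (PySem.Set.ofList ((PySem.List.enumerate cs).filterMap
        (fun ic => if "^*/+-(".toList.contains ic.2 then some (ic.1 + 1) else none)))
  let marked := PySem.Set.inter pm after_trig
  (PySem.List.pyRange 0 cs.length 1).map
    (fun i => if PySem.Set.contains marked i then "true" else "false")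

-- ===== PRECONDITION & SPEC =====
def Spec_check_incre_decre_op (s : String) (out : List String) : Prop := out = check_incre_decre_op_alt s
instance (s : String) (out : List String) : Decidable (Spec_check_incre_decre_op s out) := by unfold Spec_check_incre_decre_op; infer_instance

-- ===== CLAIM (what is proved, stated in full; the proofs are below) =====
def Claim_equal_check_incre_decre_op : Prop := ∀ (s : String), Dom_check_incre_decre_op s → Spec_check_incre_decre_op s (check_incre_decre_op s)

-- ===== LEMMAS AND PROOFS =====
def pmB (c : Char) : Bool := c == '+' || c == '-'
def trigB (c : Char) : Bool := "^*/+-(".toList.contains c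
def gRef (cs : List Char) (k : Nat) : String :=
  if pmB (cs.getD k ' ') && (k == 0 || trigB (cs.getD (k - 1) ' ')) then "true" else "false"
def refList (cs : List Char) : List String := (List.range cs.length).map (gRef cs)

theorem cond_shift (p : Bool) (c : Char) :
    ((is_operator c && p) || (c == '(' && p)) = (p && trigB c) := by
  unfold is_operator trigB
  cases p <;> simp [Bool.or_assoc, beq_eq_decide]

theorem foldl_if_append (L : List Int) (c : Int → Bool) (acc : List String) :
    L.foldl (fun r i => if c i then r ++ ["true"] else r ++ ["false"]) acc
      = acc ++ L.map (fun i => if c i then "true" else "false") := by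
  induction L generalizing acc with
  | nil => simp
  | cons i L ih =>
      simp only [List.foldl_cons, List.map_cons]
      rw [ih]
      split <;> simp

theorem A_eq_ref (s : String) : check_incre_decre_op s = refList s.toList := by
  unfold check_incre_decre_op refList
  simp only []
  set cs := s.toList with hcs
  rw [foldl_if_append, List.nil_append]
  rw [PySem.List.pyRange_one]
  simp only [sub_zero, Int.toNat_natCast, List.map_map]
  apply List.map_congr_left
  intro k hk
  have hk' : k < cs.length := List.mem_range.mp hk
  simp only [Function.comp_apply, zero_add]
  cases k with
  | zero =>
      have hne : cs ≠ [] := by intro h; rw [h] at hk'; simp at hk'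
      have hm1 : ((0:Nat):Int) - 1 = -1 := by simp
      rw [hm1, PySem.List.pyGetD_neg_one (h := hne)]
      simp only [PySem.List.pyGetD_natCast]
      unfold gRef pmB
      cases hp : (cs.getD 0 ' ' == '+' || cs.getD 0 ' ' == '-') <;> simp
  | succ m =>
      have h1 : ((m+1 : Nat) : Int) - 1 = (m : Int) := by push_cast; ring
      simp only [h1, PySem.List.pyGetD_natCast]
      unfold gRef pmB
      have h2 : (((m+1 : Nat) : Int) == 0) = false := by simp only [beq_eq_false_iff_ne, ne_eq]; push_cast; omega
      rw [h2]
      simp only [Bool.false_and, Bool.false_or, Nat.add_sub_cancel]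
      rw [cond_shift]
      have h3 : (((m+1 : Nat)) == 0) = false := by simp
      rw [h3]
      simp [Bool.and_comm]

theorem pm_contains (c : Char) : ("+-".toList.contains c) = pmB c := by
  unfold pmB
  have h : "+-".toList = ['+', '-'] := rfl
  rw [h]
  cases h1 : c == '+' <;> cases h2 : c == '-' <;> simp_all

theorem mem_fm_enumerate (cs : List Char) (p : Char → Bool) (g : Int → Int) (x : Int) :
    (x ∈ (PySem.List.enumerate cs).filterMap
        (fun ic => if p ic.2 then some (g ic.1) else none)) ↔
      ∃ (j : Nat), j < cs.length ∧ p (cs.getD j ' ') = true ∧ x = g (j : Int) := by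
  rw [List.mem_filterMap]
  constructor
  · rintro ⟨ic, hm, hv⟩
    obtain ⟨k, hk, rfl⟩ := (PySem.List.mem_enumerate_iff cs 0 ic).mp hm
    have hg : cs.getD k ' ' = cs[k] := by simp [List.getD, List.getElem?_eq_getElem hk]
    by_cases hp : p cs[k] = true
    · refine ⟨k, hk, by rw [hg]; exact hp, ?_⟩
      simp only [hp, if_true, Option.some_inj] at hv
      simp [← hv]
    · simp [hp] at hv
  · rintro ⟨j, hj, hp, rfl⟩
    have hg : cs.getD j ' ' = cs[j] := by simp [List.getD, List.getElem?_eq_getElem hj]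
    refine ⟨((j : Int), cs[j]), (PySem.List.mem_enumerate_iff cs 0 _).mpr ⟨j, hj, by simp⟩, ?_⟩
    rw [hg] at hp
    simp [hp]

theorem B_eq_ref (s : String) : check_incre_decre_op_alt s = refList s.toList := by
  unfold check_incre_decre_op_alt refList
  simp only []
  set cs := s.toList with hcs
  rw [PySem.List.pyRange_one]
  simp only [sub_zero, Int.toNat_natCast, List.map_map]
  apply List.map_congr_left
  intro k hk
  have hk' : k < cs.length := List.mem_range.mp hk
  simp only [Function.comp_apply, zero_add]
  have hmarked :
      (PySem.Set.contains
        (PySem.Set.inter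
          (PySem.Set.ofList ((PySem.List.enumerate cs).filterMap
            (fun ic => if "+-".toList.contains ic.2 then some ic.1 else none)))
          (PySem.Set.union (PySem.Set.ofList [(0 : Int)])
            (PySem.Set.ofList ((PySem.List.enumerate cs).filterMap
              (fun ic => if "^*/+-(".toList.contains ic.2 then some (ic.1 + 1) else none)))))
        (k : Int))
      = (pmB (cs.getD k ' ') && (k == 0 || trigB (cs.getD (k - 1) ' '))) := by
    rcases hb : (pmB (cs.getD k ' ') && (k == 0 || trigB (cs.getD (k - 1) ' '))) with _ | _
    · -- false: membership fails
      rw [Bool.eq_false_iff]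
      intro hcon
      have hmem := (PySem.Set.contains_iff _ _).mp hcon
      rw [PySem.Set.mem_inter, PySem.Set.mem_ofList, PySem.Set.mem_union,
        PySem.Set.mem_ofList, PySem.Set.mem_ofList,
        mem_fm_enumerate (g := fun i => i), mem_fm_enumerate (g := fun i => i + 1)] at hmem
      obtain ⟨⟨j, hj, hpj, hxj⟩, hafter⟩ := hmem
      have hjk : j = k := by omega
      rw [hjk, pm_contains] at hpj
      rcases hafter with h0 | ⟨j2, hj2, ht2, hx2⟩
      · have hk0 : k = 0 := by simp at h0; omega
        rw [hk0] at hb hpj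
        rw [hpj] at hb
        simp at hb
      · have hj2k : j2 = k - 1 := by omega
        rw [hj2k] at ht2
        have ht2' : trigB (cs.getD (k - 1) ' ') = true := ht2
        have hk0 : (k == 0) = false := by simp; omega
        rw [hpj, hk0, Bool.true_and, Bool.false_or] at hb
        rw [hb] at ht2'
        exact Bool.false_ne_true ht2' 
    · -- true: membership holds
      rw [Bool.and_eq_true] at hb
      obtain ⟨hpm, hor⟩ := hb
      apply (PySem.Set.contains_iff _ _).mpr
      rw [PySem.Set.mem_inter, PySem.Set.mem_ofList, PySem.Set.mem_union,
        PySem.Set.mem_ofList, PySem.Set.mem_ofList,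
        mem_fm_enumerate (g := fun i => i), mem_fm_enumerate (g := fun i => i + 1)]
      constructor
      · exact ⟨k, hk', by rw [pm_contains]; exact hpm, rfl⟩
      · rw [Bool.or_eq_true] at hor
        rcases hor with h0 | ht
        · left; simp at h0 ⊢; omega
        · by_cases hk0 : k = 0
          · left; simp [hk0]
          · right
            exact ⟨k - 1, by omega, ht, by omega⟩
  rw [hmarked]
  unfold gRef
  rfl

-- ===== VERDICT (by name: the statement is the Claim_ definition above) =====
theorem check_incre_decre_op_spec : Claim_equal_check_incre_decre_op := by
  intro s _
  unfold Spec_check_incre_decre_op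
  rw [A_eq_ref, B_eq_ref]
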